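-- pv_equiv track=rewrite | github.com/LeikRad/LEI-UA | 1-1/FP/aula05/rsolucao/9.py | evenThenOdd
-- ===== SOURCE A (Python) =====
-- def evenThenOdd(txt):
--     i = 0
--     j = 1
--     eto = ""
--     while(i < len(txt)):
--         eto = eto + txt[i]
--         i += 2
--     while(j < len(txt)):
--         eto = eto + txt[j]
--         j +=2
--     return(eto)
-- ===== SOURCE B (Python) =====
-- def evenThenOdd(txt):
--     evens = []
--     odds = []
--     for idx, ch in enumerate(txt):
--         if idx % 2 == 0:
--             evens.append(ch)
--         else:
--             odds.append(ch)
--     return ''.join(evens) + ''.join(odds)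
-- ===== Notes on version B (the rewrite author's own statement) =====
-- stated objective: faster
-- what changed: Replaces A's two separate stride-2 index while-loops, each growing the result by repeated string concatenation, with a single enumerate pass that partitions characters by index parity into two list buffers joined once at the end.
import Mathlib
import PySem

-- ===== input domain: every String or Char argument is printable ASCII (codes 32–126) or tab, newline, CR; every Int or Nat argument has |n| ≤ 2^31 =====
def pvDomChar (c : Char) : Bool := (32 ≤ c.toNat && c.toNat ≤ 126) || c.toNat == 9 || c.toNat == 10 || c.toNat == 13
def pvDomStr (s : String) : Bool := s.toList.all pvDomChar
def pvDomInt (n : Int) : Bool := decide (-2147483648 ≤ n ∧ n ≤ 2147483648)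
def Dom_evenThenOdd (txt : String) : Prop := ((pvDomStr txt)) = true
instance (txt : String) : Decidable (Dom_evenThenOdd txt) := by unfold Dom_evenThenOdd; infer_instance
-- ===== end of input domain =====

-- B: one enumerate pass partitioning chars by index parity into two buffers, joined once,
-- instead of A's two stride-2 while-loops; equal return value on all strings.


-- ===== PORT A =====
-- one while-loop of A: 'while i < len(txt): eto = eto + txt[i]; i += 2'
def loopA (cs : List Char) (i : Nat) (eto : List Char) : List Char :=
  if h : i < cs.length then loopA cs (i + 2) (eto ++ [cs[i]]) else eto
termination_by cs.length - i

def evenThenOdd (txt : String) : String :=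
  String.mk (loopA txt.toList 1 (loopA txt.toList 0 []))

-- ===== PORT B =====
-- the single for-loop over enumerate(txt): append to evens if idx % 2 == 0 else to odds
def partB (l : List (Int × Char)) : List Char × List Char :=
  l.foldl (fun acc p => if p.1 % 2 == 0 then (acc.1 ++ [p.2], acc.2) else (acc.1, acc.2 ++ [p.2]))
    ([], [])

def evenThenOdd_alt (txt : String) : String :=
  String.mk ((partB (PySem.List.enumerate txt.toList 0)).1 ++ (partB (PySem.List.enumerate txt.toList 0)).2)

-- ===== PRECONDITION & SPEC =====
def Spec_evenThenOdd (txt : String) (out : String) : Prop := out = evenThenOdd_alt txt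
instance (txt : String) (out : String) : Decidable (Spec_evenThenOdd txt out) := by unfold Spec_evenThenOdd; infer_instance

-- ===== CLAIM (what is proved, stated in full; the proofs are below) =====
def Claim_equal_evenThenOdd : Prop := ∀ (txt : String), Dom_evenThenOdd txt → Spec_evenThenOdd txt (evenThenOdd txt)

-- ===== LEMMAS AND PROOFS =====

-- characters at even / odd positions
mutual
def evC : List Char → List Char
  | [] => []
  | a :: t => a :: odC t
def odC : List Char → List Char
  | [] => []
  | _ :: t => evC t
end

lemma loopA_acc (n : Nat) : ∀ (cs : List Char) (i : Nat), cs.length - i ≤ n →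
    ∀ eto, loopA cs i eto = eto ++ loopA cs i [] := by
  induction n with
  | zero =>
    intro cs i h eto
    rw [loopA, loopA]
    rw [dif_neg (by omega), dif_neg (by omega)]
    simp
  | succ m ih =>
    intro cs i h eto
    by_cases hi : i < cs.length
    · rw [loopA, loopA]
      rw [dif_pos hi, dif_pos hi]
      rw [ih cs (i + 2) (by omega), ih cs (i + 2) (by omega) ([] ++ [cs[i]])]
      simp
    · rw [loopA, loopA]
      rw [dif_neg hi, dif_neg hi]
      simp

lemma loopA_succ (n : Nat) : ∀ (t : List Char) (a : Char) (i : Nat), t.length - i ≤ n →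
    loopA (a :: t) (i + 1) [] = loopA t i [] := by
  induction n with
  | zero =>
    intro t a i h
    rw [loopA, loopA]
    rw [dif_neg (by simp; omega), dif_neg (by omega)]
  | succ m ih =>
    intro t a i h
    by_cases hi : i < t.length
    · rw [loopA, loopA]
      rw [dif_pos (by simp; omega), dif_pos hi]
      have h1 : (a :: t)[i + 1]'(by simp; omega) = t[i] := by simp
      rw [h1]
      rw [loopA_acc ((a :: t).length - (i + 3)) (a :: t) (i + 3) le_rfl,
          loopA_acc (t.length - (i + 2)) t (i + 2) le_rfl]
      have h2 : i + 1 + 2 = i + 2 + 1 := by omega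
      rw [h2, ih t a (i + 2) (by omega)]
    · rw [loopA, loopA]
      rw [dif_neg (by simp; omega), dif_neg hi]

lemma loopA_evC_odC : ∀ (cs : List Char), loopA cs 0 [] = evC cs ∧ loopA cs 1 [] = odC cs := by
  intro cs
  induction cs with
  | nil =>
    constructor <;> (rw [loopA]; rw [dif_neg (by simp)]) <;> simp [evC, odC]
  | cons a t ih =>
    constructor
    · rw [loopA, dif_pos (by simp)]
      rw [loopA_acc ((a :: t).length - 2) (a :: t) 2 le_rfl]
      have : (2 : Nat) = 1 + 1 := rfl
      rw [this, loopA_succ t.length t a 1 (by omega)]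
      simp [evC, ih.2]
    · rw [show (1 : Nat) = 0 + 1 from rfl, loopA_succ t.length t a 0 (by omega)]
      simp [odC, ih.1]

def feP (l : List (Int × Char)) : List Char :=
  l.filterMap (fun p => if p.1 % 2 == 0 then some p.2 else none)
def foP (l : List (Int × Char)) : List Char :=
  l.filterMap (fun p => if p.1 % 2 == 0 then none else some p.2)

lemma partB_eq (l : List (Int × Char)) : ∀ ev od,
    l.foldl (fun acc p => if p.1 % 2 == 0 then (acc.1 ++ [p.2], acc.2) else (acc.1, acc.2 ++ [p.2]))
      (ev, od) = (ev ++ feP l, od ++ foP l) := by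
  induction l with
  | nil => intro ev od; simp [feP, foP]
  | cons p t ih =>
    intro ev od
    by_cases hp : (p.1 % 2 == 0) = true
    · rw [List.foldl_cons, if_pos hp, ih]
      unfold feP foP
      rw [List.filterMap_cons, List.filterMap_cons, if_pos hp, if_pos hp]
      simp
    · rw [List.foldl_cons, if_neg hp, ih]
      unfold feP foP
      rw [List.filterMap_cons, List.filterMap_cons, if_neg hp, if_neg hp]
      simp

lemma fe_fo_enum : ∀ (cs : List Char) (k : Int),
    feP (PySem.List.enumerate cs k) = (if k % 2 == 0 then evC cs else odC cs) ∧
    foP (PySem.List.enumerate cs k) = (if k % 2 == 0 then odC cs else evC cs) := by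
  intro cs
  induction cs with
  | nil => intro k; simp [PySem.List.enumerate_nil, feP, foP, evC, odC]
  | cons a t ih =>
    intro k
    have hpar : ((k + 1) % 2 == 0) = !(k % 2 == 0) := by
      have h01 : k % 2 = 0 ∨ k % 2 = 1 := by omega
      rcases h01 with h | h
      · have h2 : (k + 1) % 2 = 1 := by omega
        simp [h, h2]
      · have h2 : (k + 1) % 2 = 0 := by omega
        simp [h, h2]
    obtain ⟨h1, h2⟩ := ih (k + 1)
    rw [hpar] at h1 h2
    by_cases hk : (k % 2 == 0) = true
    · rw [hk] at h1 h2
      rw [show (!true) = false from rfl, if_neg Bool.false_ne_true] at h1 h2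
      have hk0 : k % 2 = 0 := by simpa using hk
      have hk2 : (2 : Int) ∣ k := Int.dvd_of_emod_eq_zero hk0
      simp only [feP, foP] at h1 h2 ⊢
      simp at h1 h2
      rw [PySem.List.enumerate_cons]
      simp [hk, hk2, h1, h2, evC, odC]
    · have hk' : (k % 2 == 0) = false := by simpa using hk
      rw [hk'] at h1 h2
      rw [show (!false) = true from rfl, if_pos rfl] at h1 h2
      have hk0 : k % 2 ≠ 0 := by simpa using hk'
      have hk2 : ¬ (2 : Int) ∣ k := by omega
      simp only [feP, foP] at h1 h2 ⊢
      simp at h1 h2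
      rw [PySem.List.enumerate_cons]
      simp [hk', hk2, h1, h2, evC, odC]

-- ===== VERDICT (by name: the statement is the Claim_ definition above) =====
theorem evenThenOdd_spec : Claim_equal_evenThenOdd := by
  intro txt _
  unfold Spec_evenThenOdd evenThenOdd evenThenOdd_alt partB
  rw [partB_eq]
  obtain ⟨hA0, hA1⟩ := loopA_evC_odC txt.toList
  obtain ⟨hB0, hB1⟩ := fe_fo_enum txt.toList 0
  simp only [show ((0 : Int) % 2 == 0) = true from rfl] at hB0 hB1
  rw [loopA_acc (txt.toList.length - 1) txt.toList 1 le_rfl, hA0, hA1, hB0, hB1]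
  simp
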